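-- pv_equiv track=rewrite | github.com/user999987/MY_NOTES | leetcode/Binary Search Trees/H_determine_same_BST.py | bstCheck
-- ===== SOURCE A (Python) =====
-- def bstCheck(arr1,arr2, root1Index, root2Index, minValue, maxValue):
--
-- 	if root1Index==-1 or root2Index==-1:
-- 		return root1Index == root2Index
-- 	elif arr1[root1Index]!=arr2[root2Index]:
-- 		return False
--
-- 	left1Idx = getLeftIdx(arr1, root1Index, minValue)
-- 	right1Idx = getRightIdx(arr1, root1Index, maxValue)
--
-- 	left2Idx = getLeftIdx(arr2, root2Index, minValue)
-- 	right2Idx = getRightIdx(arr2, root2Index, maxValue)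
--
-- 	left = bstCheck(arr1,arr2, left1Idx, left2Idx, minValue, arr1[root1Index])
-- 	right = bstCheck(arr1,arr2, right1Idx, right2Idx,  arr1[root1Index], maxValue)
--
-- 	return left and right
--
-- def getLeftIdx(array, rootIdx, minValue):
-- 	for i in range(rootIdx+1, len(array)):
-- 		if array[i]<array[rootIdx] and array[i]>=minValue:
-- 			return i
-- 	return -1
--
-- def getRightIdx(array, rootIdx, maxValue):
-- 	for i in range(rootIdx+1, len(array)):
-- 		if array[i]>=array[rootIdx] and array[i]<maxValue:
-- 			return i
-- 	return -1
-- ===== SOURCE B (Python) =====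
-- def bstCheck(arr1, arr2, root1Index, root2Index, minValue, maxValue):
--     if root1Index == -1 or root2Index == -1:
--         return root1Index == root2Index
--     return (extract(arr1, root1Index, minValue, maxValue)
--             == extract(arr2, root2Index, minValue, maxValue))
--
-- def extract(array, idx, minValue, maxValue):
--     # materialise the BST rooted at idx (bounds [minValue, maxValue)) as nested tuples
--     if idx == -1:
--         return None
--     v = array[idx]
--     n = len(array)
--     l = next((i for i in range(idx + 1, n) if minValue <= array[i] < v), -1)
--     r = next((i for i in range(idx + 1, n) if v <= array[i] < maxValue), -1)
--     return (v, extract(array, l, minValue, v), extract(array, r, v, maxValue))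
-- ===== Notes on version B (the rewrite author's own statement) =====
-- stated objective: alternative
-- what changed: Instead of A's joint double recursion comparing the two arrays in lockstep, B materialises the bound-constrained BST of each array independently as a nested-tuple tree (with a single generic first-child scan) and compares the two trees for equality.
import Mathlib
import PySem

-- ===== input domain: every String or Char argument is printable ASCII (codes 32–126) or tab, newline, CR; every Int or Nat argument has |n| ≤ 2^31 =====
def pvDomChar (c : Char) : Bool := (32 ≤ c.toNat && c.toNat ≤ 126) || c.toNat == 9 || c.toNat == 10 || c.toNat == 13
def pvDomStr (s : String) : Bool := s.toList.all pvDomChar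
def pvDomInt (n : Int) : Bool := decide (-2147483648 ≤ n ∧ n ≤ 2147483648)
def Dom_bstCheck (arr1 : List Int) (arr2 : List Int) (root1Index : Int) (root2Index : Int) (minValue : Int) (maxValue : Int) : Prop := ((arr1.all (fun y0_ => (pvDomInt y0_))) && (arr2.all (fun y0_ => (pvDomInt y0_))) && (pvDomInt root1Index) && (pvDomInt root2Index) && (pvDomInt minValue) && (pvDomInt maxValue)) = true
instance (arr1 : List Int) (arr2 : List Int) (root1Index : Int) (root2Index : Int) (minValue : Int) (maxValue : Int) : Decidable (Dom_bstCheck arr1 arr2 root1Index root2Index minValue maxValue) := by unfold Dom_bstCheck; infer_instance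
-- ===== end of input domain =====

-- B replaces A's joint double recursion with two independent tree extractions compared for equality; objective: alternative decomposition, no speed claim.

-- ===== PORT A =====
-- getLeftIdx: 'for i in range(rootIdx+1, len(array)): if array[i]<array[rootIdx] and array[i]>=minValue: return i; return -1'
-- ported as a first-match scan over the pyRange list; pyGet? none (IndexError, unreachable when rootIdx is a valid index) skips.
def leftScan (array : List Int) (rootIdx : Int) (minValue : Int) : List Int → Int
  | [] => -1
  | i :: rest =>
    match PySem.List.pyGet? array i, PySem.List.pyGet? array rootIdx with
    | some vi, some vr => if vi < vr ∧ minValue ≤ vi then i else leftScan array rootIdx minValue rest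
    | _, _ => leftScan array rootIdx minValue rest

def getLeftIdx (array : List Int) (rootIdx : Int) (minValue : Int) : Int :=
  leftScan array rootIdx minValue (PySem.List.pyRange (rootIdx + 1) (array.length : Int) 1)

def rightScan (array : List Int) (rootIdx : Int) (maxValue : Int) : List Int → Int
  | [] => -1
  | i :: rest =>
    match PySem.List.pyGet? array i, PySem.List.pyGet? array rootIdx with
    | some vi, some vr => if vr ≤ vi ∧ vi < maxValue then i else rightScan array rootIdx maxValue rest
    | _, _ => rightScan array rootIdx maxValue rest

def getRightIdx (array : List Int) (rootIdx : Int) (maxValue : Int) : Int :=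
  rightScan array rootIdx maxValue (PySem.List.pyRange (rootIdx + 1) (array.length : Int) 1)

-- termination measure: 0 for the -1 sentinel, else length+1-i (child indices only grow along the scans)
def bstMeasure (n : Nat) (i : Int) : Nat := if i = -1 then 0 else ((n : Int) + 1 - i).toNat

theorem leftScan_bound (array : List Int) (rootIdx minValue : Int) (l : List Int)
    (h : ∀ i ∈ l, rootIdx < i ∧ i < (array.length : Int)) :
    leftScan array rootIdx minValue l = -1 ∨
      (rootIdx < leftScan array rootIdx minValue l ∧ leftScan array rootIdx minValue l < (array.length : Int)) := by
  induction l with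
  | nil => left; rfl
  | cons i rest ih =>
    have hi := h i (by simp)
    have hrest : ∀ j ∈ rest, rootIdx < j ∧ j < (array.length : Int) := fun j hj => h j (List.mem_cons_of_mem _ hj)
    simp only [leftScan]
    cases PySem.List.pyGet? array i <;> cases PySem.List.pyGet? array rootIdx <;>
      simp only [] <;> first
        | exact ih hrest
        | (split
           · right; exact hi
           · exact ih hrest)

theorem rightScan_bound (array : List Int) (rootIdx maxValue : Int) (l : List Int)
    (h : ∀ i ∈ l, rootIdx < i ∧ i < (array.length : Int)) :
    rightScan array rootIdx maxValue l = -1 ∨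
      (rootIdx < rightScan array rootIdx maxValue l ∧ rightScan array rootIdx maxValue l < (array.length : Int)) := by
  induction l with
  | nil => left; rfl
  | cons i rest ih =>
    have hi := h i (by simp)
    have hrest : ∀ j ∈ rest, rootIdx < j ∧ j < (array.length : Int) := fun j hj => h j (List.mem_cons_of_mem _ hj)
    simp only [rightScan]
    cases PySem.List.pyGet? array i <;> cases PySem.List.pyGet? array rootIdx <;>
      simp only [] <;> first
        | exact ih hrest
        | (split
           · right; exact hi
           · exact ih hrest)

theorem getLeftIdx_bound (array : List Int) (rootIdx minValue : Int) :
    getLeftIdx array rootIdx minValue = -1 ∨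
      (rootIdx < getLeftIdx array rootIdx minValue ∧ getLeftIdx array rootIdx minValue < (array.length : Int)) := by
  apply leftScan_bound
  intro i hi
  have := (PySem.List.mem_pyRange_one).1 hi
  omega

theorem getRightIdx_bound (array : List Int) (rootIdx maxValue : Int) :
    getRightIdx array rootIdx maxValue = -1 ∨
      (rootIdx < getRightIdx array rootIdx maxValue ∧ getRightIdx array rootIdx maxValue < (array.length : Int)) := by
  apply rightScan_bound
  intro i hi
  have := (PySem.List.mem_pyRange_one).1 hi
  omega

theorem inRange_of_pyGet?_some {α : Type} (xs : List α) (i : Int) (v : α)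
    (h : PySem.List.pyGet? xs i = some v) : -(xs.length : Int) ≤ i ∧ i < (xs.length : Int) := by
  by_contra hc
  have : PySem.List.pyGet? xs i = none := by
    rw [PySem.List.pyGet?_eq_none_iff]
    simp [PySem.Raise.InRange]
    omega
  simp [this] at h

theorem bstMeasure_lt (n : Nat) (r c : Int) (hr1 : r ≠ -1) (hhi : r < (n : Int))
    (hc : c = -1 ∨ (r < c ∧ c < (n : Int))) : bstMeasure n c < bstMeasure n r := by
  unfold bstMeasure
  rcases hc with h | h <;> split_ifs <;> omega

-- bstCheck: literal port of A's double recursion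
def bstCheck (arr1 : List Int) (arr2 : List Int) (root1Index : Int) (root2Index : Int) (minValue : Int) (maxValue : Int) : Bool :=
  if root1Index = -1 ∨ root2Index = -1 then
    root1Index == root2Index
  else
    match h1 : PySem.List.pyGet? arr1 root1Index, PySem.List.pyGet? arr2 root2Index with
    | some v1, some v2 =>
      if v1 ≠ v2 then false
      else
        let left1Idx := getLeftIdx arr1 root1Index minValue
        let right1Idx := getRightIdx arr1 root1Index maxValue
        let left2Idx := getLeftIdx arr2 root2Index minValue
        let right2Idx := getRightIdx arr2 root2Index maxValue
        let left := bstCheck arr1 arr2 left1Idx left2Idx minValue v1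
        let right := bstCheck arr1 arr2 right1Idx right2Idx v1 maxValue
        left && right
    | _, _ => false   -- Python raises IndexError here; excluded by Pre_
termination_by bstMeasure arr1.length root1Index
decreasing_by
  · have hb := inRange_of_pyGet?_some arr1 root1Index v1 h1
    exact bstMeasure_lt arr1.length root1Index _ (by tauto) hb.2 (getLeftIdx_bound arr1 root1Index minValue)
  · have hb := inRange_of_pyGet?_some arr1 root1Index v1 h1
    exact bstMeasure_lt arr1.length root1Index _ (by tauto) hb.2 (getRightIdx_bound arr1 root1Index maxValue)

-- ===== PORT B =====
-- Source B's nested tuples (v, left, right) / None become an explicit tree type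
inductive BTree : Type
  | leaf : BTree
  | node : Int → BTree → BTree → BTree
deriving DecidableEq

-- Source B's generic first-child scan: 'next((i for i in range(idx+1, n) if lo <= array[i] < hi), -1)'
def firstIdx (array : List Int) (idx : Int) (lo hi : Int) : Int :=
  ((PySem.List.pyRange (idx + 1) (array.length : Int) 1).find? (fun i =>
      match PySem.List.pyGet? array i with
      | some w => decide (lo ≤ w ∧ w < hi)
      | none => false)).getD (-1)

theorem firstIdx_bound (array : List Int) (idx lo hi : Int) :
    firstIdx array idx lo hi = -1 ∨
      (idx < firstIdx array idx lo hi ∧ firstIdx array idx lo hi < (array.length : Int)) := by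
  unfold firstIdx
  cases hf : (PySem.List.pyRange (idx + 1) (array.length : Int) 1).find? (fun i =>
      match PySem.List.pyGet? array i with
      | some w => decide (lo ≤ w ∧ w < hi)
      | none => false) with
  | none => left; rfl
  | some j =>
    right
    have hmem := List.mem_of_find?_eq_some hf
    have := (PySem.List.mem_pyRange_one).1 hmem
    simp only [Option.getD_some]
    omega

-- extract: literal port of Source B's extract (pyGet? none = IndexError in Python, unreachable from a valid root)
def extract (array : List Int) (idx : Int) (minValue maxValue : Int) : BTree :=
  if idx = -1 then .leaf
  else
    match hv : PySem.List.pyGet? array idx with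
    | some v =>
      .node v (extract array (firstIdx array idx minValue v) minValue v)
              (extract array (firstIdx array idx v maxValue) v maxValue)
    | none => .leaf
termination_by bstMeasure array.length idx
decreasing_by
  · rename_i h
    have hb := inRange_of_pyGet?_some array idx v hv
    exact bstMeasure_lt array.length idx _ h hb.2 (firstIdx_bound array idx minValue v)
  · rename_i h
    have hb := inRange_of_pyGet?_some array idx v hv
    exact bstMeasure_lt array.length idx _ h hb.2 (firstIdx_bound array idx v maxValue)

def bstCheck_alt (arr1 : List Int) (arr2 : List Int) (root1Index : Int) (root2Index : Int) (minValue : Int) (maxValue : Int) : Bool :=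
  if root1Index = -1 ∨ root2Index = -1 then
    root1Index == root2Index
  else
    extract arr1 root1Index minValue maxValue == extract arr2 root2Index minValue maxValue

-- ===== PRECONDITION & SPEC =====
-- Pre_ excludes exactly the inputs where Python A raises IndexError: a root index that is neither the -1
-- sentinel (either one triggers the base case before any indexing) nor a Python-valid index into its array.
def Pre_bstCheck (arr1 : List Int) (arr2 : List Int) (root1Index : Int) (root2Index : Int) (minValue : Int) (maxValue : Int) : Prop :=
  root1Index = -1 ∨ root2Index = -1 ∨
    ((-(arr1.length : Int) ≤ root1Index ∧ root1Index < (arr1.length : Int)) ∧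
     (-(arr2.length : Int) ≤ root2Index ∧ root2Index < (arr2.length : Int)))
instance (arr1 : List Int) (arr2 : List Int) (root1Index : Int) (root2Index : Int) (minValue : Int) (maxValue : Int) : Decidable (Pre_bstCheck arr1 arr2 root1Index root2Index minValue maxValue) := by unfold Pre_bstCheck; infer_instance

def pvWitness_bstCheck : List Int × List Int × Int × Int × Int × Int := ([2, 1, 3], [2, 3, 1], 0, 0, -10, 10)

def Spec_bstCheck (arr1 : List Int) (arr2 : List Int) (root1Index : Int) (root2Index : Int) (minValue : Int) (maxValue : Int) (out : Bool) : Prop := out = bstCheck_alt arr1 arr2 root1Index root2Index minValue maxValue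
instance (arr1 : List Int) (arr2 : List Int) (root1Index : Int) (root2Index : Int) (minValue : Int) (maxValue : Int) (out : Bool) : Decidable (Spec_bstCheck arr1 arr2 root1Index root2Index minValue maxValue out) := by unfold Spec_bstCheck; infer_instance

-- ===== CLAIM (what is proved, stated in full; the proofs are below) =====
def Claim_equal_bstCheck : Prop := ∀ (arr1 : List Int) (arr2 : List Int) (root1Index : Int) (root2Index : Int) (minValue : Int) (maxValue : Int), Dom_bstCheck arr1 arr2 root1Index root2Index minValue maxValue → Pre_bstCheck arr1 arr2 root1Index root2Index minValue maxValue → Spec_bstCheck arr1 arr2 root1Index root2Index minValue maxValue (bstCheck arr1 arr2 root1Index root2Index minValue maxValue)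

-- ===== LEMMAS AND PROOFS =====
-- B's single scan agrees with A's two scans once the root value is known
theorem leftScan_eq_find (array : List Int) (rootIdx minValue v : Int)
    (hr : PySem.List.pyGet? array rootIdx = some v) (l : List Int) :
    leftScan array rootIdx minValue l =
      (l.find? (fun i =>
        match PySem.List.pyGet? array i with
        | some w => decide (minValue ≤ w ∧ w < v)
        | none => false)).getD (-1) := by
  induction l with
  | nil => rfl
  | cons i rest ih =>
    cases h : PySem.List.pyGet? array i with
    | none => simp [leftScan, h, hr, ih]
    | some vi =>
      by_cases hc : vi < v ∧ minValue ≤ vi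
      · simp [leftScan, h, hr, hc]
      · have hd : ¬(minValue ≤ vi ∧ vi < v) := fun hx => hc ⟨hx.2, hx.1⟩
        simp [leftScan, h, hr, hc, hd, ih]

theorem rightScan_eq_find (array : List Int) (rootIdx maxValue v : Int)
    (hr : PySem.List.pyGet? array rootIdx = some v) (l : List Int) :
    rightScan array rootIdx maxValue l =
      (l.find? (fun i =>
        match PySem.List.pyGet? array i with
        | some w => decide (v ≤ w ∧ w < maxValue)
        | none => false)).getD (-1) := by
  induction l with
  | nil => rfl
  | cons i rest ih =>
    cases h : PySem.List.pyGet? array i with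
    | none => simp [rightScan, h, hr, ih]
    | some vi =>
      by_cases hc : v ≤ vi ∧ vi < maxValue
      · simp [rightScan, h, hr, hc]
      · simp [rightScan, h, hr, hc, ih]

theorem getLeftIdx_eq_firstIdx (array : List Int) (rootIdx minValue v : Int)
    (hr : PySem.List.pyGet? array rootIdx = some v) :
    getLeftIdx array rootIdx minValue = firstIdx array rootIdx minValue v := by
  unfold getLeftIdx firstIdx
  exact leftScan_eq_find array rootIdx minValue v hr _

theorem getRightIdx_eq_firstIdx (array : List Int) (rootIdx maxValue v : Int)
    (hr : PySem.List.pyGet? array rootIdx = some v) :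
    getRightIdx array rootIdx maxValue = firstIdx array rootIdx v maxValue := by
  unfold getRightIdx firstIdx
  exact rightScan_eq_find array rootIdx maxValue v hr _

-- one-step unfolding lemmas (the matches are dependent, so simp cannot reduce them directly)
theorem bstCheck_base (arr1 arr2 : List Int) {i1 i2 : Int} (mn mx : Int) (h : i1 = -1 ∨ i2 = -1) :
    bstCheck arr1 arr2 i1 i2 mn mx = (i1 == i2) := by
  rw [bstCheck.eq_def, if_pos h]

theorem bstCheck_node (arr1 arr2 : List Int) {i1 i2 : Int} (mn mx : Int) {v1 v2 : Int}
    (hbase : ¬(i1 = -1 ∨ i2 = -1))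
    (h1 : PySem.List.pyGet? arr1 i1 = some v1) (h2 : PySem.List.pyGet? arr2 i2 = some v2) :
    bstCheck arr1 arr2 i1 i2 mn mx =
      if v1 ≠ v2 then false
      else bstCheck arr1 arr2 (getLeftIdx arr1 i1 mn) (getLeftIdx arr2 i2 mn) mn v1 &&
           bstCheck arr1 arr2 (getRightIdx arr1 i1 mx) (getRightIdx arr2 i2 mx) v1 mx := by
  rw [bstCheck.eq_def, if_neg hbase]
  split
  · rename_i v1' v2' hA hB
    rw [h1] at hA; rw [h2] at hB
    injection hA with hA; injection hB with hB
    subst hA; subst hB; rfl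
  · rename_i hnone
    exact (hnone v1 v2 h1 h2).elim

theorem extract_neg : ∀ (array : List Int) (mn mx : Int), extract array (-1) mn mx = .leaf := by
  intro array mn mx
  rw [extract.eq_def]
  simp

theorem extract_node (array : List Int) {idx : Int} (mn mx : Int) {v : Int}
    (h0 : idx ≠ -1) (hv : PySem.List.pyGet? array idx = some v) :
    extract array idx mn mx =
      .node v (extract array (firstIdx array idx mn v) mn v)
              (extract array (firstIdx array idx v mx) v mx) := by
  rw [extract.eq_def, if_neg h0]
  split
  · rename_i v' hv'
    rw [hv] at hv'; injection hv' with hv'; subst hv'; rfl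
  · rename_i hn
    rw [hv] at hn
    simp at hn

-- the valid-index invariant each side maintains on its own
def okIdx (array : List Int) (i : Int) : Prop :=
  i = -1 ∨ (-(array.length : Int) ≤ i ∧ i < (array.length : Int))

-- the crux: A's lockstep recursion decides equality of the two independently extracted trees
theorem bstCheck_eq_extract (arr1 arr2 : List Int) (i1 i2 mn mx : Int) :
    okIdx arr1 i1 → okIdx arr2 i2 →
    bstCheck arr1 arr2 i1 i2 mn mx =
      (extract arr1 i1 mn mx == extract arr2 i2 mn mx) := by
  induction i1, i2, mn, mx using bstCheck.induct arr1 arr2 with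
  | case1 i1 i2 mn mx hbase =>
    intro ho1 ho2
    rw [bstCheck_base arr1 arr2 mn mx hbase]
    rcases hbase with h | h
    · subst h
      rw [extract_neg]
      by_cases h2 : i2 = -1
      · subst h2; rw [extract_neg]; simp
      · rcases ho2 with h2' | h2'
        · exact absurd h2' h2
        · have : ∃ v2, PySem.List.pyGet? arr2 i2 = some v2 := by
            cases hv : PySem.List.pyGet? arr2 i2 with
            | none =>
              rw [PySem.List.pyGet?_eq_none_iff] at hv
              simp [PySem.Raise.InRange] at hv
              omega
            | some v => exact ⟨v, rfl⟩
          obtain ⟨v2, hv2⟩ := this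
          rw [extract_node arr2 mn mx h2 hv2]
          simp [BEq.beq]
          omega
    · subst h
      rw [extract_neg (array := arr2)]
      by_cases h1 : i1 = -1
      · subst h1; rw [extract_neg]; simp
      · rcases ho1 with h1' | h1'
        · exact absurd h1' h1
        · have : ∃ v1, PySem.List.pyGet? arr1 i1 = some v1 := by
            cases hv : PySem.List.pyGet? arr1 i1 with
            | none =>
              rw [PySem.List.pyGet?_eq_none_iff] at hv
              simp [PySem.Raise.InRange] at hv
              omega
            | some v => exact ⟨v, rfl⟩
          obtain ⟨v1, hv1⟩ := this
          rw [extract_node arr1 mn mx h1 hv1]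
          simp [BEq.beq]
          omega
  | case2 i1 i2 mn mx hbase v1 v2 h1 h2 hneq =>
    intro ho1 ho2
    have hn1 : i1 ≠ -1 := fun h => hbase (Or.inl h)
    have hn2 : i2 ≠ -1 := fun h => hbase (Or.inr h)
    rw [bstCheck_node arr1 arr2 mn mx hbase h1 h2, if_pos hneq,
        extract_node arr1 mn mx hn1 h1, extract_node arr2 mn mx hn2 h2]
    simp [BEq.beq, hneq]
  | case3 i1 i2 mn mx hbase v1 v2 h1 h2 hneq l1 r1 l2 r2 ihL ihR =>
    intro ho1 ho2
    have ihL' : okIdx arr1 (getLeftIdx arr1 i1 mn) → okIdx arr2 (getLeftIdx arr2 i2 mn) →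
        bstCheck arr1 arr2 (getLeftIdx arr1 i1 mn) (getLeftIdx arr2 i2 mn) mn v1 =
          (extract arr1 (getLeftIdx arr1 i1 mn) mn v1 == extract arr2 (getLeftIdx arr2 i2 mn) mn v1) := ihL
    have ihR' : okIdx arr1 (getRightIdx arr1 i1 mx) → okIdx arr2 (getRightIdx arr2 i2 mx) →
        bstCheck arr1 arr2 (getRightIdx arr1 i1 mx) (getRightIdx arr2 i2 mx) v1 mx =
          (extract arr1 (getRightIdx arr1 i1 mx) v1 mx == extract arr2 (getRightIdx arr2 i2 mx) v1 mx) := ihR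
    have hn1 : i1 ≠ -1 := fun h => hbase (Or.inl h)
    have hn2 : i2 ≠ -1 := fun h => hbase (Or.inr h)
    have hb1 := inRange_of_pyGet?_some arr1 i1 v1 h1
    have hb2 := inRange_of_pyGet?_some arr2 i2 v2 h2
    have hv : v1 = v2 := by by_contra h; exact hneq h
    subst hv
    have okL1 : okIdx arr1 (getLeftIdx arr1 i1 mn) := by
      rcases getLeftIdx_bound arr1 i1 mn with h | h
      · exact Or.inl h
      · exact Or.inr ⟨by omega, h.2⟩
    have okL2 : okIdx arr2 (getLeftIdx arr2 i2 mn) := by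
      rcases getLeftIdx_bound arr2 i2 mn with h | h
      · exact Or.inl h
      · exact Or.inr ⟨by omega, h.2⟩
    have okR1 : okIdx arr1 (getRightIdx arr1 i1 mx) := by
      rcases getRightIdx_bound arr1 i1 mx with h | h
      · exact Or.inl h
      · exact Or.inr ⟨by omega, h.2⟩
    have okR2 : okIdx arr2 (getRightIdx arr2 i2 mx) := by
      rcases getRightIdx_bound arr2 i2 mx with h | h
      · exact Or.inl h
      · exact Or.inr ⟨by omega, h.2⟩
    rw [bstCheck_node arr1 arr2 mn mx hbase h1 h2, if_neg hneq,
        extract_node arr1 mn mx hn1 h1, extract_node arr2 mn mx hn2 h2,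
        ihL' okL1 okL2, ihR' okR1 okR2,
        getLeftIdx_eq_firstIdx arr1 i1 mn v1 h1, getLeftIdx_eq_firstIdx arr2 i2 mn v1 h2,
        getRightIdx_eq_firstIdx arr1 i1 mx v1 h1, getRightIdx_eq_firstIdx arr2 i2 mx v1 h2]
    show _ = (BTree.node v1 _ _ == BTree.node v1 _ _)
    cases hL : (extract arr1 (firstIdx arr1 i1 mn v1) mn v1 == extract arr2 (firstIdx arr2 i2 mn v1) mn v1) <;>
      cases hR : (extract arr1 (firstIdx arr1 i1 v1 mx) v1 mx == extract arr2 (firstIdx arr2 i2 v1 mx) v1 mx) <;>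
      simp_all [BEq.beq]
  | case4 i1 i2 mn mx hbase hnone =>
    intro ho1 ho2
    have hn1 : i1 ≠ -1 := fun h => hbase (Or.inl h)
    have hn2 : i2 ≠ -1 := fun h => hbase (Or.inr h)
    rcases ho1 with h | hb1
    · exact absurd h hn1
    rcases ho2 with h | hb2
    · exact absurd h hn2
    exfalso
    cases hv1 : PySem.List.pyGet? arr1 i1 with
    | none =>
      rw [PySem.List.pyGet?_eq_none_iff] at hv1
      simp [PySem.Raise.InRange] at hv1
      omega
    | some v1 =>
      cases hv2 : PySem.List.pyGet? arr2 i2 with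
      | none =>
        rw [PySem.List.pyGet?_eq_none_iff] at hv2
        simp [PySem.Raise.InRange] at hv2
        omega
      | some v2 => exact hnone v1 v2 hv1 hv2

-- ===== VERDICT (by name: the statement is the Claim_ definition above) =====
theorem bstCheck_spec : Claim_equal_bstCheck := by
  intro arr1 arr2 i1 i2 mn mx _ hpre
  unfold Spec_bstCheck bstCheck_alt
  by_cases hbase : i1 = -1 ∨ i2 = -1
  · rw [if_pos hbase, bstCheck_base arr1 arr2 mn mx hbase]
  · rw [if_neg hbase]
    rcases hpre with h | h | ⟨hb1, hb2⟩
    · exact absurd (Or.inl h) hbase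
    · exact absurd (Or.inr h) hbase
    · exact bstCheck_eq_extract arr1 arr2 i1 i2 mn mx (Or.inr hb1) (Or.inr hb2)
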